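-- pv_equiv track=rewrite | github.com/hhzet11/algorithm_codingTest_study | PGS/level_2/할인 행사.py | solution
-- ===== SOURCE A (Python) =====
-- from collections import Counter
--
-- def solution(want, number, discount):
--     answer = 0
--     wanted = {}
--     for i, w in enumerate(want):
--         if w not in discount:
--             return 0
--         else:
--             wanted[w] = number[i]
--     wanted = sorted(wanted.items(), key=lambda x: x[0])
--
--     for i in range(len(discount) - 9):
--         dc = discount[i: i + 10]
--         num = sorted(dict(Counter(dc)).items(), key=lambda x: x[0])
--         if wanted == num:
--             answer += 1
--
--     return answer
-- ===== SOURCE B (Python) =====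
-- def solution(want, number, discount):
--     wanted = {}
--     for i, w in enumerate(want):
--         if w not in discount:
--             return 0
--         wanted[w] = number[i]
--     if len(discount) < 10:
--         return 0
--     cnt = {}
--     for x in discount[:10]:
--         cnt[x] = cnt.get(x, 0) + 1
--     answer = 1 if cnt == wanted else 0
--     for i in range(10, len(discount)):
--         out = discount[i - 10]
--         c = cnt[out] - 1
--         if c == 0:
--             del cnt[out]
--         else:
--             cnt[out] = c
--         x = discount[i]
--         cnt[x] = cnt.get(x, 0) + 1
--         if cnt == wanted:
--             answer += 1
--     return answer
-- ===== Notes on version B (the rewrite author's own statement) =====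
-- stated objective: faster
-- what changed: A rebuilds a Counter of every 10-element window and compares sorted item lists per window; B builds the window counter once, slides it (decrement the element leaving, increment the element entering, deleting keys that reach 0) and tests order-insensitive dict equality against the wanted dict, with an up-front length guard instead of re-slicing and re-sorting.
import Mathlib
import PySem

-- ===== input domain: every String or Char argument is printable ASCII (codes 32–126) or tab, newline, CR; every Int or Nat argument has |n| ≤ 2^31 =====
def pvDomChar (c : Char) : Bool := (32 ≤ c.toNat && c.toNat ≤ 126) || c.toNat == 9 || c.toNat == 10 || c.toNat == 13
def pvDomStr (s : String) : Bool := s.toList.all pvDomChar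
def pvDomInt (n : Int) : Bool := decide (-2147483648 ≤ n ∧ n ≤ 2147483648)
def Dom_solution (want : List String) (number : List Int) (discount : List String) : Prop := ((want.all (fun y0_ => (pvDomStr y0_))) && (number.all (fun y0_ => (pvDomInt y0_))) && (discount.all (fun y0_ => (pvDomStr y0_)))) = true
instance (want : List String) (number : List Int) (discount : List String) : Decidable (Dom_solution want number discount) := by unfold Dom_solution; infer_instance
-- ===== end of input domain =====

-- B replaces A's per-window Counter rebuild + sort + sorted-items comparison by a single
-- counter maintained incrementally across the sliding window and an order-insensitive dict
-- equality test (objective: faster, constant-factor: no re-counting/sorting per window).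

-- ===== PORT A =====
-- the 'for i, w in enumerate(want)' loop with its early 'return 0' (none = early return);
-- number[i] is ported with pyGetD: under Pre_solution every accessed index is in range
def solA_build (pairs : List (Int × String)) (number : List Int) (discount : List String)
    (acc : PySem.Dict String Int) : Option (PySem.Dict String Int) :=
  match pairs with
  | [] => some acc
  | (i, w) :: rest =>
    if discount.contains w then
      solA_build rest number discount (acc.insert w (PySem.List.pyGetD number i 0))
    else none

-- one iteration of A's window loop
def solA_step (discount : List String) (wanted : List (String × Int)) (answer : Int) (i : Int) : Int :=
  let dc := PySem.List.slice discount (some i) (some (i + 10))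
  let num := PySem.List.sorted (PySem.Dict.counter dc).items (fun p => p.1)
  if wanted = num then answer + 1 else answer

def solution (want : List String) (number : List Int) (discount : List String) : Int :=
  match solA_build (PySem.List.enumerate want 0) number discount PySem.Dict.empty with
  | none => 0
  | some wd =>
    let wanted := PySem.List.sorted wd.items (fun p => p.1)
    (PySem.List.pyRange 0 ((discount.length : Int) - 9) 1).foldl (solA_step discount wanted) 0

-- ===== PORT B =====
-- Python's order-insensitive 'cnt == wanted' on dicts (both sides have unique keys)
def dictEqPy (d e : PySem.Dict String Int) : Bool :=
  d.size == e.size && d.items.all (fun p => e.get? p.1 == some p.2)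

-- Source B's 'for i, w in enumerate(want)' loop, i carried explicitly
def solB_build (want : List String) (number : List Int) (discount : List String) (i : Int)
    (acc : PySem.Dict String Int) : Option (PySem.Dict String Int) :=
  match want with
  | [] => some acc
  | w :: rest =>
    if discount.contains w then
      solB_build rest number discount (i + 1) (acc.insert w (PySem.List.pyGetD number i 0))
    else none

-- one iteration of Source B's sliding loop; 'cnt[out]' is ported as getD out 0: the element
-- leaving the window is always a key of cnt, so Python's lookup never raises KeyError
def solB_step (discount : List String) (wd : PySem.Dict String Int)
    (s : PySem.Dict String Int × Int) (i : Int) : PySem.Dict String Int × Int :=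
  let out := PySem.List.pyGetD discount (i - 10) ""
  let c := s.1.getD out 0 - 1
  let cnt1 := if c == 0 then s.1.erase out else s.1.insert out c
  let x := PySem.List.pyGetD discount i ""
  let cnt2 := cnt1.insert x (cnt1.getD x 0 + 1)
  (cnt2, if dictEqPy cnt2 wd then s.2 + 1 else s.2)

def solution_alt (want : List String) (number : List Int) (discount : List String) : Int :=
  match solB_build want number discount 0 PySem.Dict.empty with
  | none => 0
  | some wd =>
    if (discount.length : Int) < 10 then 0
    else
      let cnt := (PySem.List.slice discount none (some 10)).foldl
        (fun d x => d.insert x (d.getD x 0 + 1)) PySem.Dict.empty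
      let answer : Int := if dictEqPy cnt wd then 1 else 0
      ((PySem.List.pyRange 10 (discount.length : Int) 1).foldl (solB_step discount wd) (cnt, answer)).2

-- ===== PRECONDITION & SPEC =====
-- Pre_ excludes exactly the inputs on which A raises IndexError: number shorter than want
-- while every want item checked before the bad index is present in discount.
def Pre_solution (want : List String) (number : List Int) (discount : List String) : Prop :=
  want.length ≤ number.length ∨
    ((want.take (number.length + 1)).any (fun w => !discount.contains w)) = true
instance (want : List String) (number : List Int) (discount : List String) : Decidable (Pre_solution want number discount) := by unfold Pre_solution; infer_instance

def pvWitness_solution : List String × List Int × List String :=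
  (["a"], [2], ["a", "a", "b", "c", "d", "e", "f", "g", "h", "i", "j"])

def Spec_solution (want : List String) (number : List Int) (discount : List String) (out : Int) : Prop := out = solution_alt want number discount
instance (want : List String) (number : List Int) (discount : List String) (out : Int) : Decidable (Spec_solution want number discount out) := by unfold Spec_solution; infer_instance

-- ===== CLAIM (what is proved, stated in full; the proofs are below) =====
def Claim_equal_solution : Prop := ∀ (want : List String) (number : List Int) (discount : List String), Dom_solution want number discount → Pre_solution want number discount → Spec_solution want number discount (solution want number discount)

-- ===== LEMMAS AND PROOFS =====

-- window count as an optional value: what a Python counter dict answers for key k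
def wcnt (l : List String) (k : String) : Option Int :=
  if l.count k = 0 then none else some (l.count k)

theorem get?_counter_eq (xs : List String) (k : String) :
    (PySem.Dict.counter xs).get? k = wcnt xs k := by
  by_cases hmem : k ∈ xs
  · have hc : xs.count k ≠ 0 := by simpa using List.count_pos_iff.mpr hmem |>.ne'
    rcases ho : (PySem.Dict.counter xs).get? k with _ | v
    · rw [PySem.Dict.get?_eq_none_iff_not_mem_keys, PySem.Dict.keys_counter] at ho
      exact absurd ((PySem.Set.mem_ofList _ _).mpr hmem) ho
    · have hg := PySem.Dict.getD_counter xs k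
      rw [PySem.Dict.getD_eq_get?_getD, ho] at hg
      simp only [Option.getD_some] at hg
      simp [wcnt, hc, hg]
  · have hc : xs.count k = 0 := List.count_eq_zero.mpr hmem
    have ho : (PySem.Dict.counter xs).get? k = none := by
      rw [PySem.Dict.get?_eq_none_iff_not_mem_keys, PySem.Dict.keys_counter]
      simpa [PySem.Set.mem_ofList _ _] using hmem
    simp [wcnt, hc, ho]

theorem getD_of_wcnt (cnt : PySem.Dict String Int) (l : List String)
    (h : ∀ k, cnt.get? k = wcnt l k) (x : String) :
    cnt.getD x 0 = (l.count x : Int) := by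
  rw [PySem.Dict.getD_eq_get?_getD, h x]
  by_cases hc : l.count x = 0 <;> simp [wcnt, hc]

theorem find?_filter_of_ne (l : List (String × Int)) (k k' : String) (h : k' ≠ k) :
    List.find? (fun p => p.1 == k') (l.filter (fun p => !p.1 == k)) =
      List.find? (fun p => p.1 == k') l := by
  induction l with
  | nil => simp
  | cons p t ih =>
    by_cases hp : p.1 = k
    · have h1 : (!(p.1 == k)) = false := by simp [hp]
      have hne : (p.1 == k') = false := by simp [hp, show k ≠ k' from Ne.symm h]
      simp only [List.filter_cons, h1, Bool.false_eq_true, if_false, List.find?_cons, hne]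
      exact ih
    · have h1 : (!(p.1 == k)) = true := by simp [hp]
      simp only [List.filter_cons, h1, if_true, List.find?_cons]
      by_cases hk' : p.1 = k'
      · have h2 : (p.1 == k') = true := by simp [hk']
        simp only [h2]
      · have h2 : (p.1 == k') = false := by simp [hk']
        simp only [h2]
        exact ih

theorem get?_erase_eq (d : PySem.Dict String Int) (k k' : String) :
    (d.erase k).get? k' = if k' = k then none else d.get? k' := by
  show (PySem.Dict.get? ⟨List.filter _ d.items⟩ k') = _
  by_cases hk : k' = k
  · subst hk
    simp [PySem.Dict.get?]
  · simp [PySem.Dict.get?, find?_filter_of_ne d.items k k' hk, hk]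

theorem nodup_keys_erase (d : PySem.Dict String Int) (k : String)
    (h : d.keys.Nodup) : (d.erase k).keys.Nodup := by
  have hs : (d.erase k).items.Sublist d.items := by
    show (List.filter _ d.items).Sublist d.items
    exact List.filter_sublist
  simp only [PySem.Dict.keys] at h ⊢
  exact h.sublist (hs.map _)

theorem nodup_items (d : PySem.Dict String Int) (h : d.keys.Nodup) : d.items.Nodup := by
  simp only [PySem.Dict.keys] at h
  exact h.of_map

theorem items_perm_of_get?_eq (d e : PySem.Dict String Int)
    (hd : d.keys.Nodup) (he : e.keys.Nodup)
    (h : ∀ k, d.get? k = e.get? k) : d.items.Perm e.items := by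
  rw [List.perm_ext_iff_of_nodup (nodup_items d hd) (nodup_items e he)]
  intro p
  rw [← PySem.Dict.get?_eq_some_iff_mem_items d p.1 p.2 hd,
      ← PySem.Dict.get?_eq_some_iff_mem_items e p.1 p.2 he, h p.1]

theorem get?_eq_of_items_perm (d e : PySem.Dict String Int)
    (hd : d.keys.Nodup) (he : e.keys.Nodup)
    (h : d.items.Perm e.items) : ∀ k, d.get? k = e.get? k := by
  intro k
  rcases ho : d.get? k with _ | v
  · rw [PySem.Dict.get?_eq_none_iff_not_mem_keys] at ho
    symm
    rw [PySem.Dict.get?_eq_none_iff_not_mem_keys]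
    simp only [PySem.Dict.keys] at ho ⊢
    exact fun hc => ho ((h.map (fun p => p.1)).mem_iff.mpr hc)
  · have hm : (k, v) ∈ d.items := (PySem.Dict.get?_eq_some_iff_mem_items d k v hd).mp ho
    exact ((PySem.Dict.get?_eq_some_iff_mem_items e k v he).mpr (h.mem_iff.mp hm)).symm

theorem sorted_items_eq_iff (d e : PySem.Dict String Int)
    (hd : d.keys.Nodup) (he : e.keys.Nodup) :
    PySem.List.sorted d.items (fun p => p.1) = PySem.List.sorted e.items (fun p => p.1) ↔
      ∀ k, d.get? k = e.get? k := by
  constructor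
  · intro hsort
    have hperm : d.items.Perm e.items :=
      (PySem.List.sorted_perm d.items (fun p => p.1) false).symm.trans
        (hsort ▸ PySem.List.sorted_perm e.items (fun p => p.1) false)
    exact get?_eq_of_items_perm d e hd he hperm
  · intro h
    have hperm : d.items.Perm e.items := items_perm_of_get?_eq d e hd he h
    have hsp : (PySem.List.sorted d.items (fun p => p.1)).Perm e.items :=
      (PySem.List.sorted_perm d.items (fun p => p.1) false).trans hperm
    have hle : List.Pairwise (fun a b : String × Int => a.1 ≤ b.1)
        (PySem.List.sorted d.items (fun p => p.1)) :=
      PySem.List.sorted_pairwise d.items (fun p => p.1)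
    have hkeysnd : ((PySem.List.sorted d.items (fun p => p.1)).map (fun p => p.1)).Nodup := by
      have h1 : ((PySem.List.sorted d.items (fun p => p.1)).map (fun p => p.1)).Perm
          (d.items.map (fun p => p.1)) :=
        (PySem.List.sorted_perm d.items (fun p => p.1) false).map _
      refine h1.nodup_iff.mpr ?_
      simpa only [PySem.Dict.keys] using hd
    have hlt : List.Pairwise (fun a b : String × Int => a.1 < b.1)
        (PySem.List.sorted d.items (fun p => p.1)) :=
      (hle.and (List.pairwise_map.mp hkeysnd)).imp (fun h => lt_of_le_of_ne h.1 h.2)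
    exact (PySem.List.sorted_eq_of_perm_of_pairwise_lt e.items
      (PySem.List.sorted d.items (fun p => p.1)) (fun p => p.1) hsp hlt).symm

theorem dictEqPy_iff (d e : PySem.Dict String Int)
    (hd : d.keys.Nodup) (he : e.keys.Nodup) :
    dictEqPy d e = true ↔ ∀ k, d.get? k = e.get? k := by
  constructor
  · intro hq
    rcases Bool.and_eq_true_iff.mp hq with ⟨hsz, hall⟩
    have hsub : d.items ⊆ e.items := by
      intro p hp
      have := List.all_eq_true.mp hall p hp
      exact (PySem.Dict.get?_eq_some_iff_mem_items e p.1 p.2 he).mp (by simpa using this)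
    have hlen : e.items.length ≤ d.items.length := by
      have : d.size = e.size := by simpa using hsz
      simp only [PySem.Dict.size] at this
      omega
    have hperm : d.items.Perm e.items :=
      ((nodup_items d hd).subperm hsub).perm_of_length_le hlen
    exact get?_eq_of_items_perm d e hd he hperm
  · intro h
    have hperm : d.items.Perm e.items := items_perm_of_get?_eq d e hd he h
    refine Bool.and_eq_true_iff.mpr ⟨?_, ?_⟩
    · simp [PySem.Dict.size, hperm.length_eq]
    · refine List.all_eq_true.mpr (fun p hp => ?_)
      have : d.get? p.1 = some p.2 := (PySem.Dict.get?_eq_some_iff_mem_items d p.1 p.2 hd).mpr hp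
      simp [← h p.1, this]

theorem build_eq (want : List String) (number : List Int) (discount : List String) :
    ∀ (s : Int) (acc : PySem.Dict String Int),
      solA_build (PySem.List.enumerate want s) number discount acc =
        solB_build want number discount s acc := by
  induction want with
  | nil => intro s acc; simp [PySem.List.enumerate_nil, solA_build, solB_build]
  | cons w rest ih =>
    intro s acc
    rw [PySem.List.enumerate_cons]
    simp only [solA_build, solB_build]
    split
    · exact ih (s + 1) _
    · rfl

theorem build_nodup (want : List String) (number : List Int) (discount : List String) :
    ∀ (s : Int) (acc : PySem.Dict String Int) (wd : PySem.Dict String Int),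
      solB_build want number discount s acc = some wd → acc.keys.Nodup → wd.keys.Nodup := by
  induction want with
  | nil => intro s acc wd hw hacc; simp only [solB_build] at hw; cases hw; exact hacc
  | cons w rest ih =>
    intro s acc wd hw hacc
    simp only [solB_build] at hw
    split at hw
    · exact ih (s + 1) _ wd hw (PySem.Dict.nodup_keys_insert _ _ _ hacc)
    · cases hw

theorem step_insert (cnt : PySem.Dict String Int) (l : List String) (x : String)
    (h : ∀ k, cnt.get? k = wcnt l k) :
    ∀ k, (cnt.insert x (cnt.getD x 0 + 1)).get? k = wcnt (l ++ [x]) k := by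
  intro k
  rw [PySem.Dict.get?_insert]
  by_cases hk : k = x
  · subst hk
    rw [if_pos rfl, getD_of_wcnt cnt l h k]
    have : (l ++ [k]).count k = l.count k + 1 := by simp
    simp [wcnt, this]
  · rw [if_neg hk]
    have : (l ++ [x]).count k = l.count k := by simp [Ne.symm hk]
    simp [wcnt, this, h k]

theorem step_remove (cnt : PySem.Dict String Int) (x : String) (t : List String)
    (h : ∀ k, cnt.get? k = wcnt (x :: t) k) (hnd : cnt.keys.Nodup) :
    (∀ k, (if (cnt.getD x 0 - 1) == 0 then cnt.erase x else cnt.insert x (cnt.getD x 0 - 1)).get? k = wcnt t k) ∧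
      (if (cnt.getD x 0 - 1) == 0 then cnt.erase x else cnt.insert x (cnt.getD x 0 - 1)).keys.Nodup := by
  have hgd : cnt.getD x 0 = ((x :: t).count x : Int) := getD_of_wcnt cnt (x :: t) h x
  have hcx : (x :: t).count x = t.count x + 1 := by simp
  have hc : cnt.getD x 0 - 1 = (t.count x : Int) := by rw [hgd, hcx]; push_cast; ring
  by_cases h0 : (cnt.getD x 0 - 1) == 0
  · have ht0 : t.count x = 0 := by
      have := beq_iff_eq.mp h0
      omega
    rw [if_pos h0]
    refine ⟨fun k => ?_, nodup_keys_erase cnt x hnd⟩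
    rw [get?_erase_eq]
    by_cases hk : k = x
    · subst hk; simp [wcnt, ht0]
    · rw [if_neg hk, h k]
      have : (x :: t).count k = t.count k := by simp [Ne.symm hk]
      simp [wcnt, this]
  · have ht0 : t.count x ≠ 0 := by
      intro hz
      apply h0
      rw [hc, hz]
      simp
    rw [if_neg h0]
    refine ⟨fun k => ?_, PySem.Dict.nodup_keys_insert _ _ _ hnd⟩
    rw [PySem.Dict.get?_insert]
    by_cases hk : k = x
    · subst hk; rw [if_pos rfl, hc]; simp [wcnt, ht0]
    · rw [if_neg hk, h k]
      have : (x :: t).count k = t.count k := by simp [Ne.symm hk]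
      simp [wcnt, this]

theorem cond_iff (wd cnt : PySem.Dict String Int) (hwd : wd.keys.Nodup)
    (hnd : cnt.keys.Nodup) (w : List String)
    (hc : ∀ k, cnt.get? k = wcnt w k) :
    (dictEqPy cnt wd = true) ↔
      (PySem.List.sorted wd.items (fun p => p.1) =
        PySem.List.sorted (PySem.Dict.counter w).items (fun p => p.1)) := by
  rw [dictEqPy_iff cnt wd hnd hwd,
      sorted_items_eq_iff wd (PySem.Dict.counter w) hwd (PySem.Dict.nodup_keys_counter w)]
  constructor
  · intro hh k
    rw [get?_counter_eq]
    exact (hh k).symm.trans (hc k)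
  · intro hh k
    rw [hc k, ← get?_counter_eq]
    exact (hh k).symm

theorem slide (discount : List String) (wd : PySem.Dict String Int) (hwd : wd.keys.Nodup)
    (m : Nat) (h10 : 10 ≤ m) (hm : m ≤ discount.length) :
    (∀ k, ((PySem.List.pyRange 10 (m : Int) 1).foldl (solB_step discount wd)
        (PySem.Dict.counter (discount.take 10),
         if dictEqPy (PySem.Dict.counter (discount.take 10)) wd then 1 else 0)).1.get? k =
        wcnt ((discount.drop (m - 10)).take 10) k) ∧
    ((PySem.List.pyRange 10 (m : Int) 1).foldl (solB_step discount wd)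
        (PySem.Dict.counter (discount.take 10),
         if dictEqPy (PySem.Dict.counter (discount.take 10)) wd then 1 else 0)).1.keys.Nodup ∧
    ((PySem.List.pyRange 10 (m : Int) 1).foldl (solB_step discount wd)
        (PySem.Dict.counter (discount.take 10),
         if dictEqPy (PySem.Dict.counter (discount.take 10)) wd then 1 else 0)).2 =
      (PySem.List.pyRange 0 ((m : Int) - 9) 1).foldl
        (solA_step discount (PySem.List.sorted wd.items (fun p => p.1))) 0 := by
  revert hm
  induction m, h10 using Nat.le_induction with
  | base =>
    intro hm
    rw [show ((10:Nat):Int) = (10:Int) by norm_num,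
        PySem.List.pyRange_one_eq_nil (le_refl (10:Int))]
    simp only [List.foldl_nil]
    refine ⟨?_, PySem.Dict.nodup_keys_counter _, ?_⟩
    · intro k
      rw [get?_counter_eq]
      simp
    · rw [show ((10:Int) - 9) = (0:Int) + 1 by norm_num,
          PySem.List.pyRange_one_singleton]
      simp only [List.foldl_cons, List.foldl_nil]
      rw [solA_step]
      have hdc : PySem.List.slice discount (some 0) (some (0 + 10)) = discount.take 10 := by
        rw [show (0:Int) = ((0:Nat):Int) by norm_num]
        rw [show ((0:Nat):Int) + 10 = ((10:Nat):Int) by norm_num]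
        rw [PySem.List.slice_natCast]
        simp
      rw [hdc]
      by_cases hcond : dictEqPy (PySem.Dict.counter (discount.take 10)) wd = true
      · rw [if_pos hcond,
            if_pos ((cond_iff wd _ hwd (PySem.Dict.nodup_keys_counter _) (discount.take 10)
              (get?_counter_eq _)).mp hcond)]
        norm_num
      · rw [if_neg hcond,
            if_neg (fun hp => hcond ((cond_iff wd _ hwd (PySem.Dict.nodup_keys_counter _)
              (discount.take 10) (get?_counter_eq _)).mpr hp))]
  | succ m h10m ih =>
    intro hm1
    have hmn : m < discount.length := by omega
    have hm : m ≤ discount.length := by omega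
    obtain ⟨hS1, hS2, hS3⟩ := ih hm
    have hcast : ((m + 1 : Nat) : Int) = (m : Int) + 1 := by push_cast; ring
    rw [hcast, PySem.List.pyRange_one_succ_right (by exact_mod_cast h10m : (10:Int) ≤ (m:Int)),
        List.foldl_append]
    set S := (PySem.List.pyRange 10 (m : Int) 1).foldl (solB_step discount wd)
      (PySem.Dict.counter (discount.take 10),
       if dictEqPy (PySem.Dict.counter (discount.take 10)) wd then 1 else 0) with hSdef
    simp only [List.foldl_cons, List.foldl_nil]
    rw [solB_step]
    have h10n : 10 ≤ discount.length := by omega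
    have hnat : m - 10 < discount.length := by omega
    have hx1 : PySem.List.pyGetD discount ((m:Int) - 10) "" = discount.getD (m - 10) "" := by
      rw [show ((m:Int) - 10) = ((m - 10 : Nat) : Int) by omega, PySem.List.pyGetD_natCast]
    have hx2 : PySem.List.pyGetD discount (m:Int) "" = discount.getD m "" := by
      rw [PySem.List.pyGetD_natCast]
    have hgd1 : discount.getD (m - 10) "" = discount[m - 10]'hnat := List.getD_eq_getElem _ _ hnat
    have hgd2 : discount.getD m "" = discount[m]'hmn := List.getD_eq_getElem _ _ hmn
    have hcons : (discount.drop (m - 10)).take 10 =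
        discount[m - 10]'hnat :: (discount.drop (m - 9)).take 9 := by
      rw [List.drop_eq_getElem_cons hnat, show m - 10 + 1 = m - 9 by omega]
      rfl
    have hold : ∀ k, S.1.get? k =
        wcnt (discount[m - 10]'hnat :: (discount.drop (m - 9)).take 9) k := by
      intro k; rw [hS1 k, hcons]
    obtain ⟨hC1, hC1nd⟩ := step_remove S.1 (discount[m - 10]'hnat)
      ((discount.drop (m - 9)).take 9) hold hS2
    have hnew : ∀ k,
        ((if (S.1.getD (discount[m-10]'hnat) 0 - 1) == 0
            then S.1.erase (discount[m-10]'hnat)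
            else S.1.insert (discount[m-10]'hnat) (S.1.getD (discount[m-10]'hnat) 0 - 1)).insert
          (discount[m]'hmn)
          ((if (S.1.getD (discount[m-10]'hnat) 0 - 1) == 0
            then S.1.erase (discount[m-10]'hnat)
            else S.1.insert (discount[m-10]'hnat) (S.1.getD (discount[m-10]'hnat) 0 - 1)).getD
              (discount[m]'hmn) 0 + 1)).get? k =
        wcnt ((discount.drop (m - 9)).take 9 ++ [discount[m]'hmn]) k :=
      step_insert _ _ _ hC1
    have hwin : (discount.drop (m - 9)).take 9 ++ [discount[m]'hmn] =
        (discount.drop (m + 1 - 10)).take 10 := by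
      rw [show m + 1 - 10 = m - 9 by omega]
      have h9 : 9 < (discount.drop (m - 9)).length := by
        rw [List.length_drop]; omega
      have hel : (discount.drop (m - 9))[9]'h9 = discount[m]'hmn := by
        rw [List.getElem_drop]
        congr 1
        omega
      rw [← hel, List.take_append_getElem h9]
    rw [hx1, hx2, hgd1, hgd2]
    set cnt2 : PySem.Dict String Int :=
      (if (S.1.getD (discount[m-10]'hnat) 0 - 1) == 0
          then S.1.erase (discount[m-10]'hnat)
          else S.1.insert (discount[m-10]'hnat) (S.1.getD (discount[m-10]'hnat) 0 - 1)).insert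
        (discount[m]'hmn)
        ((if (S.1.getD (discount[m-10]'hnat) 0 - 1) == 0
          then S.1.erase (discount[m-10]'hnat)
          else S.1.insert (discount[m-10]'hnat) (S.1.getD (discount[m-10]'hnat) 0 - 1)).getD
            (discount[m]'hmn) 0 + 1) with hcnt2def
    have hnd2 : cnt2.keys.Nodup := by
      rw [hcnt2def]; exact PySem.Dict.nodup_keys_insert _ _ _ hC1nd
    have hget2 : ∀ k, cnt2.get? k = wcnt ((discount.drop (m + 1 - 10)).take 10) k := by
      intro k; rw [hcnt2def, hnew k, hwin]
    refine ⟨hget2, hnd2, ?_⟩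
    rw [show ((m:Int) + 1) - 9 = ((m:Int) - 9) + 1 by ring,
        PySem.List.pyRange_one_succ_right (by omega : (0:Int) ≤ (m:Int) - 9),
        List.foldl_append]
    simp only [List.foldl_cons, List.foldl_nil]
    rw [hS3, solA_step]
    have hdc : PySem.List.slice discount (some ((m:Int) - 9)) (some ((m:Int) - 9 + 10)) =
        (discount.drop (m - 9)).take 10 := by
      rw [show ((m:Int) - 9) = ((m - 9 : Nat) : Int) by omega,
          show ((m - 9 : Nat) : Int) + 10 = ((m + 1 : Nat) : Int) by omega,
          PySem.List.slice_natCast, show m + 1 - (m - 9) = 10 by omega]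
    rw [hdc]
    have hwnd : ∀ k, cnt2.get? k = wcnt ((discount.drop (m - 9)).take 10) k := by
      intro k; rw [hget2 k, show m + 1 - 10 = m - 9 by omega]
    have hiff := cond_iff wd cnt2 hwd hnd2 ((discount.drop (m - 9)).take 10) hwnd
    by_cases hcond : dictEqPy cnt2 wd = true
    · rw [if_pos hcond, if_pos (hiff.mp hcond)]
    · rw [if_neg hcond, if_neg (fun hp => hcond (hiff.mpr hp))]

-- ===== VERDICT (by name: the statement is the Claim_ definition above) =====
theorem solution_spec : Claim_equal_solution := by
  intro want number discount _hdom _hpre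
  simp only [Spec_solution, solution, solution_alt,
    build_eq want number discount 0 PySem.Dict.empty]
  cases hb : solB_build want number discount 0 PySem.Dict.empty with
  | none => rfl
  | some wd =>
    have hwd : wd.keys.Nodup :=
      build_nodup want number discount 0 _ wd hb PySem.Dict.nodup_keys_empty
    dsimp only
    by_cases hlen : (discount.length : Int) < 10
    · rw [if_pos hlen, PySem.List.pyRange_one_eq_nil (by omega : (discount.length : Int) - 9 ≤ 0)]
      rfl
    · rw [if_neg hlen]
      have h10 : 10 ≤ discount.length := by omega
      have hcnt : (PySem.List.slice discount none (some 10)).foldl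
          (fun d x => d.insert x (d.getD x 0 + 1)) PySem.Dict.empty =
          PySem.Dict.counter (discount.take 10) := by
        rw [PySem.List.slice_to discount (by norm_num : (0:Int) ≤ (10:Int)),
            show ((10:Int).toNat) = 10 from rfl]
        exact PySem.Dict.foldl_insert_getD_add_one_eq_counter _
      rw [hcnt]
      exact ((slide discount wd hwd discount.length h10 le_rfl).2.2).symm
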